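-- pv_equiv track=rewrite | github.com/frostburn/porcupyne | src/porcupyne/util.py | note_unicode
-- ===== SOURCE A (Python) =====
-- def note_unicode(letter, sharps, arrows, octaves=None):
--     if sharps == 0:
--         accidental = chr(0x266E)
--         if arrows < 0:
--             accidental = chr(0x1D12F)
--         elif arrows > 0:
--             accidental = chr(0x1D12E)
--     elif sharps == 1:
--         accidental = chr(0x266F)
--         if arrows < 0:
--             accidental = chr(0x1D131)
--         elif arrows > 0:
--             accidental = chr(0x1D130)
--     elif sharps == -1:
--         accidental = chr(0x266D)
--         if arrows < 0:
--             accidental = chr(0x1D12D)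
--         elif arrows > 0:
--             accidental = chr(0x1D12C)
--     elif sharps >= 2:
--         accidental = chr(0x1D12A)
--     elif sharps <= -2:
--         accidental = chr(0x1D12B)
--
--     if abs(sharps) >= 2:
--         while sharps > 2:
--             if sharps > 3:
--                 accidental += chr(0x1D12A)
--                 sharps -= 2
--             else:
--                 accidental = chr(0x266F) + accidental
--                 sharps -= 1
--         while sharps < -2:
--             if sharps < -3:
--                 accidental += chr(0x1D12B)
--                 sharps += 2
--             else:
--                 accidental = chr(0x266D) + accidental
--                 sharps += 1
--         if arrows < 0:
--             accidental += chr(0x1F813)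
--         elif arrows > 0:
--             accidental += chr(0x1F811)
--
--     if octaves is None:
--         result = letter + accidental
--     else:
--         result = letter + str(octaves) + accidental
--
--     if abs(arrows) > 1:
--         result += str(abs(arrows))
--     return result
-- ===== SOURCE B (Python) =====
-- def note_unicode(letter, sharps, arrows, octaves=None):
--     m = abs(sharps)
--     if m >= 2:
--         if sharps > 0:
--             accidental = (chr(0x266F) if m % 2 else '') + chr(0x1D12A) * (m // 2)
--         else:
--             accidental = (chr(0x266D) if m % 2 else '') + chr(0x1D12B) * (m // 2)
--         if arrows < 0:
--             accidental += chr(0x1F813)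
--         elif arrows > 0:
--             accidental += chr(0x1F811)
--     else:
--         table = {
--             0: (0x266E, 0x1D12F, 0x1D12E),
--             1: (0x266F, 0x1D131, 0x1D130),
--             -1: (0x266D, 0x1D12D, 0x1D12C),
--         }[sharps]
--         accidental = chr(table[0] if arrows == 0 else (table[1] if arrows < 0 else table[2]))
--     octave_part = '' if octaves is None else str(octaves)
--     suffix = str(abs(arrows)) if abs(arrows) > 1 else ''
--     return letter + octave_part + accidental + suffix
-- ===== Notes on version B (the rewrite author's own statement) =====
-- stated objective: simpler
-- what changed: B replaces A's decrement-by-1-or-2 while loops that assemble the multi-sharp/flat accidental glyph by glyph with a closed form: a parity-selected single sharp/flat prefix plus abs(sharps)//2 copies of the double glyph, and a single lookup table for the |sharps|<2 cases.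
import Mathlib
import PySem

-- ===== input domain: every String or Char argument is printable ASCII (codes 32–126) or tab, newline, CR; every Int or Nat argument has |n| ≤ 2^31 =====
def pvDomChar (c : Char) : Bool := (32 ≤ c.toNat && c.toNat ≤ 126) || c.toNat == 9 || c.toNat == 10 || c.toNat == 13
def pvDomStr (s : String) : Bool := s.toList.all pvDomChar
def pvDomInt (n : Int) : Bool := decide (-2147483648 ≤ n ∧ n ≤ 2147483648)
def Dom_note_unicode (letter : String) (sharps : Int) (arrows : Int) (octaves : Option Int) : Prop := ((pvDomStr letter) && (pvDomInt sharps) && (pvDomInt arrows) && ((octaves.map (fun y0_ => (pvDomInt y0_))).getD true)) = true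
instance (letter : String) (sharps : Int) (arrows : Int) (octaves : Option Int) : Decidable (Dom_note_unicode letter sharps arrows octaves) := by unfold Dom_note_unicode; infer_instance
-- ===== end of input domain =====

-- B replaces A's glyph-by-glyph decrement loops with a closed-form (parity prefix + repeated
-- double glyph) accidental; objective: simpler. Return-value equivalence; neither mutates input.

-- ===== PORT A =====
-- chr(n) as a one-character string
def pvChr (n : Nat) : String := String.ofList [Char.ofNat n]

-- 'while sharps > 2' loop of A; returns the updated (accidental, sharps)
def noteLoopSharp (acc : String) (s : Int) : String × Int :=
  if s > 2 then
    if s > 3 then noteLoopSharp (acc ++ pvChr 0x1D12A) (s - 2)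
    else noteLoopSharp (pvChr 0x266F ++ acc) (s - 1)
  else (acc, s)
termination_by (s - 2).toNat
decreasing_by all_goals omega

-- 'while sharps < -2' loop of A; returns the updated (accidental, sharps)
def noteLoopFlat (acc : String) (s : Int) : String × Int :=
  if s < -2 then
    if s < -3 then noteLoopFlat (acc ++ pvChr 0x1D12B) (s + 2)
    else noteLoopFlat (pvChr 0x266D ++ acc) (s + 1)
  else (acc, s)
termination_by (-2 - s).toNat
decreasing_by all_goals omega

def note_unicode (letter : String) (sharps : Int) (arrows : Int) (octaves : Option Int) : String :=
  let accidental :=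
    if sharps = 0 then
      (if arrows < 0 then pvChr 0x1D12F else if arrows > 0 then pvChr 0x1D12E else pvChr 0x266E)
    else if sharps = 1 then
      (if arrows < 0 then pvChr 0x1D131 else if arrows > 0 then pvChr 0x1D130 else pvChr 0x266F)
    else if sharps = -1 then
      (if arrows < 0 then pvChr 0x1D12D else if arrows > 0 then pvChr 0x1D12C else pvChr 0x266D)
    else if sharps ≥ 2 then pvChr 0x1D12A
    else pvChr 0x1D12B
  let accidental :=
    if |sharps| ≥ 2 then
      let p := noteLoopSharp accidental sharps
      let q := noteLoopFlat p.1 p.2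
      if arrows < 0 then q.1 ++ pvChr 0x1F813
      else if arrows > 0 then q.1 ++ pvChr 0x1F811
      else q.1
    else accidental
  let result :=
    match octaves with
    | none => letter ++ accidental
    | some o => letter ++ PySem.Int.toStr o ++ accidental
  if |arrows| > 1 then result ++ PySem.Int.toStr |arrows| else result

-- ===== PORT B =====
def note_unicode_alt (letter : String) (sharps : Int) (arrows : Int) (octaves : Option Int) : String :=
  let m := |sharps|
  let accidental :=
    if m ≥ 2 then
      let acc :=
        if sharps > 0 then
          (if m % 2 ≠ 0 then pvChr 0x266F else "")
            ++ String.ofList (List.replicate (m / 2).toNat (Char.ofNat 0x1D12A))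
        else
          (if m % 2 ≠ 0 then pvChr 0x266D else "")
            ++ String.ofList (List.replicate (m / 2).toNat (Char.ofNat 0x1D12B))
      if arrows < 0 then acc ++ pvChr 0x1F813
      else if arrows > 0 then acc ++ pvChr 0x1F811
      else acc
    else
      let t : Nat × Nat × Nat :=
        if sharps = 0 then (0x266E, 0x1D12F, 0x1D12E)
        else if sharps = 1 then (0x266F, 0x1D131, 0x1D130)
        else (0x266D, 0x1D12D, 0x1D12C)
      pvChr (if arrows = 0 then t.1 else if arrows < 0 then t.2.1 else t.2.2)
  let octavePart := match octaves with | none => "" | some o => PySem.Int.toStr o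
  let suffix := if |arrows| > 1 then PySem.Int.toStr |arrows| else ""
  letter ++ octavePart ++ accidental ++ suffix

-- ===== PRECONDITION & SPEC =====
def Spec_note_unicode (letter : String) (sharps : Int) (arrows : Int) (octaves : Option Int) (out : String) : Prop := out = note_unicode_alt letter sharps arrows octaves
instance (letter : String) (sharps : Int) (arrows : Int) (octaves : Option Int) (out : String) : Decidable (Spec_note_unicode letter sharps arrows octaves out) := by unfold Spec_note_unicode; infer_instance

-- ===== CLAIM (what is proved, stated in full; the proofs are below) =====
def Claim_equal_note_unicode : Prop := ∀ (letter : String) (sharps : Int) (arrows : Int) (octaves : Option Int), Dom_note_unicode letter sharps arrows octaves → Spec_note_unicode letter sharps arrows octaves (note_unicode letter sharps arrows octaves)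

-- ===== LEMMAS AND PROOFS =====

lemma loopSharp_id (acc : String) (s : Int) (h : s ≤ 2) : noteLoopSharp acc s = (acc, s) := by
  rw [noteLoopSharp]; rw [if_neg (by omega)]

lemma loopFlat_id (acc : String) (s : Int) (h : -2 ≤ s) : noteLoopFlat acc s = (acc, s) := by
  rw [noteLoopFlat]; rw [if_neg (by omega)]

lemma loopSharp_closed (n : Nat) (acc : String) :
    noteLoopSharp acc ((n : Int) + 2) =
      ((if n % 2 = 1 then pvChr 0x266F else "") ++ acc
        ++ String.ofList (List.replicate (n / 2) (Char.ofNat 0x1D12A)), 2) := by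
  induction n using Nat.strong_induction_on generalizing acc with
  | _ n ih =>
    match n with
    | 0 =>
      rw [noteLoopSharp]
      norm_num
    | 1 =>
      rw [noteLoopSharp]
      norm_num
      rw [loopSharp_id _ _ (by omega)]
    | (n + 2) =>
      rw [noteLoopSharp]
      rw [if_pos (by push_cast; omega), if_pos (by push_cast; omega)]
      rw [show ((n + 2 : Nat) : Int) + 2 - 2 = ((n : Int) + 2) by push_cast; ring]
      rw [ih n (by omega)]
      have hp : (n + 2) % 2 = n % 2 := by omega
      have hd : (n + 2) / 2 = n / 2 + 1 := by omega
      refine Prod.ext ?_ rfl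
      apply String.toList_inj.mp
      simp [hp, hd, pvChr, List.replicate_succ]

lemma loopFlat_closed (n : Nat) (acc : String) :
    noteLoopFlat acc (-((n : Int) + 2)) =
      ((if n % 2 = 1 then pvChr 0x266D else "") ++ acc
        ++ String.ofList (List.replicate (n / 2) (Char.ofNat 0x1D12B)), -2) := by
  induction n using Nat.strong_induction_on generalizing acc with
  | _ n ih =>
    match n with
    | 0 =>
      rw [noteLoopFlat]
      norm_num
    | 1 =>
      rw [noteLoopFlat]
      norm_num
      rw [loopFlat_id _ _ (by omega)]
    | (n + 2) =>
      rw [noteLoopFlat]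
      rw [if_pos (by push_cast; omega), if_pos (by push_cast; omega)]
      rw [show -(((n + 2 : Nat) : Int) + 2) + 2 = -((n : Int) + 2) by push_cast; ring]
      rw [ih n (by omega)]
      have hp : (n + 2) % 2 = n % 2 := by omega
      have hd : (n + 2) / 2 = n / 2 + 1 := by omega
      refine Prod.ext ?_ rfl
      apply String.toList_inj.mp
      simp [hp, hd, pvChr, List.replicate_succ]

-- proof-side copies of the two accidental computations and the two assembly shapes
def accA (sharps arrows : Int) : String :=
  let accidental :=
    if sharps = 0 then
      (if arrows < 0 then pvChr 0x1D12F else if arrows > 0 then pvChr 0x1D12E else pvChr 0x266E)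
    else if sharps = 1 then
      (if arrows < 0 then pvChr 0x1D131 else if arrows > 0 then pvChr 0x1D130 else pvChr 0x266F)
    else if sharps = -1 then
      (if arrows < 0 then pvChr 0x1D12D else if arrows > 0 then pvChr 0x1D12C else pvChr 0x266D)
    else if sharps ≥ 2 then pvChr 0x1D12A
    else pvChr 0x1D12B
  if |sharps| ≥ 2 then
    let p := noteLoopSharp accidental sharps
    let q := noteLoopFlat p.1 p.2
    if arrows < 0 then q.1 ++ pvChr 0x1F813
    else if arrows > 0 then q.1 ++ pvChr 0x1F811
    else q.1
  else accidental

def accB (sharps arrows : Int) : String :=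
  let m := |sharps|
  if m ≥ 2 then
    let acc :=
      if sharps > 0 then
        (if m % 2 ≠ 0 then pvChr 0x266F else "")
          ++ String.ofList (List.replicate (m / 2).toNat (Char.ofNat 0x1D12A))
      else
        (if m % 2 ≠ 0 then pvChr 0x266D else "")
          ++ String.ofList (List.replicate (m / 2).toNat (Char.ofNat 0x1D12B))
    if arrows < 0 then acc ++ pvChr 0x1F813
    else if arrows > 0 then acc ++ pvChr 0x1F811
    else acc
  else
    let t : Nat × Nat × Nat :=
      if sharps = 0 then (0x266E, 0x1D12F, 0x1D12E)
      else if sharps = 1 then (0x266F, 0x1D131, 0x1D130)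
      else (0x266D, 0x1D12D, 0x1D12C)
    pvChr (if arrows = 0 then t.1 else if arrows < 0 then t.2.1 else t.2.2)

def assembleA (letter : String) (arrows : Int) (octaves : Option Int) (acc : String) : String :=
  let result :=
    match octaves with
    | none => letter ++ acc
    | some o => letter ++ PySem.Int.toStr o ++ acc
  if |arrows| > 1 then result ++ PySem.Int.toStr |arrows| else result

def assembleB (letter : String) (arrows : Int) (octaves : Option Int) (acc : String) : String :=
  letter ++ (match octaves with | none => "" | some o => PySem.Int.toStr o) ++ acc
    ++ (if |arrows| > 1 then PySem.Int.toStr |arrows| else "")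

lemma assemble_eq (letter : String) (arrows : Int) (octaves : Option Int) (acc : String) :
    assembleA letter arrows octaves acc = assembleB letter arrows octaves acc := by
  unfold assembleA assembleB
  cases octaves <;> split_ifs <;> (apply String.toList_inj.mp; simp)

lemma acc_eq (s arrows : Int) : accA s arrows = accB s arrows := by
  by_cases h2 : 2 ≤ s
  · obtain ⟨n, rfl⟩ : ∃ n : Nat, s = (n : Int) + 2 := ⟨(s - 2).toNat, by omega⟩
    have c0 : ¬((n : Int) + 2 = 0) := by omega
    have c1 : ¬((n : Int) + 2 = 1) := by omega
    have cm1 : ¬((n : Int) + 2 = -1) := by omega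
    have cge : ((n : Int) + 2) ≥ 2 := by omega
    have cpos : ((n : Int) + 2) > 0 := by omega
    have habs : |((n : Int) + 2)| = (n : Int) + 2 := abs_of_nonneg (by omega)
    simp only [accA, accB, habs, c0, c1, cm1, cge, cpos, if_true, if_false]
    rw [loopSharp_closed n (pvChr 0x1D12A)]
    rw [loopFlat_id _ 2 (by omega)]
    have hpar : (((n : Int) + 2) % 2 ≠ 0) ↔ (n % 2 = 1) := by omega
    have hdiv : (((n : Int) + 2) / 2).toNat = n / 2 + 1 := by omega
    have hcore : (if n % 2 = 1 then pvChr 0x266F else "") ++ pvChr 0x1D12A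
        ++ String.ofList (List.replicate (n / 2) (Char.ofNat 0x1D12A))
        = (if ((n : Int) + 2) % 2 ≠ 0 then pvChr 0x266F else "")
          ++ String.ofList (List.replicate ((((n : Int) + 2) / 2).toNat) (Char.ofNat 0x1D12A)) := by
      rw [hdiv]
      by_cases hp : n % 2 = 1
      · rw [if_pos hp, if_pos (hpar.mpr hp)]
        apply String.toList_inj.mp
        simp [pvChr, List.replicate_succ]
      · rw [if_neg hp, if_neg (fun h => hp (hpar.mp h))]
        apply String.toList_inj.mp
        simp [pvChr, List.replicate_succ]
    simp only [hcore]
  · by_cases h3 : s ≤ -2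
    · obtain ⟨n, rfl⟩ : ∃ n : Nat, s = -((n : Int) + 2) := ⟨(-s - 2).toNat, by omega⟩
      have c0 : ¬(-((n : Int) + 2) = 0) := by omega
      have c1 : ¬(-((n : Int) + 2) = 1) := by omega
      have cm1 : ¬(-((n : Int) + 2) = -1) := by omega
      have cge : ¬(-((n : Int) + 2) ≥ 2) := by omega
      have cpos : ¬(-((n : Int) + 2) > 0) := by omega
      have habs : |(-((n : Int) + 2))| = (n : Int) + 2 := by rw [abs_of_nonpos (by omega)]; ring
      simp only [accA, accB, habs, c0, c1, cm1, cge, cpos, if_false,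
        if_pos (show ((n : Int) + 2) ≥ 2 by omega)]
      rw [loopSharp_id _ _ (by omega)]
      rw [loopFlat_closed n (pvChr 0x1D12B)]
      have hpar : (((n : Int) + 2) % 2 ≠ 0) ↔ (n % 2 = 1) := by omega
      have hdiv : (((n : Int) + 2) / 2).toNat = n / 2 + 1 := by omega
      have hcore : (if n % 2 = 1 then pvChr 0x266D else "") ++ pvChr 0x1D12B
          ++ String.ofList (List.replicate (n / 2) (Char.ofNat 0x1D12B))
          = (if ((n : Int) + 2) % 2 ≠ 0 then pvChr 0x266D else "")
            ++ String.ofList (List.replicate ((((n : Int) + 2) / 2).toNat) (Char.ofNat 0x1D12B)) := by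
        rw [hdiv]
        by_cases hp : n % 2 = 1
        · rw [if_pos hp, if_pos (hpar.mpr hp)]
          apply String.toList_inj.mp
          simp [pvChr, List.replicate_succ]
        · rw [if_neg hp, if_neg (fun h => hp (hpar.mp h))]
          apply String.toList_inj.mp
          simp [pvChr, List.replicate_succ]
      simp only [hcore]
    · have hr : s = -1 ∨ s = 0 ∨ s = 1 := by omega
      have habs : ¬(|s| ≥ 2) := by rcases hr with rfl | rfl | rfl <;> decide
      rcases hr with rfl | rfl | rfl <;>
        · simp only [accA, accB]
          norm_num
          split_ifs <;> first | rfl | omega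

-- ===== VERDICT (by name: the statement is the Claim_ definition above) =====
theorem note_unicode_spec : Claim_equal_note_unicode := by
  intro letter s a o _
  unfold Spec_note_unicode
  have h1 : note_unicode letter s a o = assembleA letter a o (accA s a) := rfl
  have h2 : note_unicode_alt letter s a o = assembleB letter a o (accB s a) := rfl
  rw [h1, h2, acc_eq, assemble_eq]
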